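-- pv_equiv track=rewrite | github.com/juliakarabasova/skillfactory_messageboard | messageboard/board_posts/templatetags/custom_filters.py | correct_word
-- ===== SOURCE A (Python) =====
-- from string import punctuation
--
-- def correct_word(word):
--     new_w = ''
--     first = True
--     for letter in word:
--         if letter in punctuation:       # Сохраняем все знаки пунктуации
--             new_w += letter
--         elif first:                     # Оставляем первую букву
--             new_w += letter
--             first = False
--         else:
--             new_w += '*'
--     return new_w
-- ===== SOURCE B (Python) =====
-- from string import punctuation
--
-- def correct_word(word):
--     idx = next((i for i, c in enumerate(word) if c not in punctuation), None)
--     if idx is None: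
--         return word
--     return word[:idx + 1] + ''.join(c if c in punctuation else '*' for c in word[idx + 1:])
-- ===== Notes on version B (the rewrite author's own statement) =====
-- stated objective: alternative
-- what changed: Replaces the single stateful-flag character loop by a two-phase decomposition: find the index of the first non-punctuation character, keep the prefix up to and including it verbatim, and map only the tail to '*'/punctuation.
import Mathlib
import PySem

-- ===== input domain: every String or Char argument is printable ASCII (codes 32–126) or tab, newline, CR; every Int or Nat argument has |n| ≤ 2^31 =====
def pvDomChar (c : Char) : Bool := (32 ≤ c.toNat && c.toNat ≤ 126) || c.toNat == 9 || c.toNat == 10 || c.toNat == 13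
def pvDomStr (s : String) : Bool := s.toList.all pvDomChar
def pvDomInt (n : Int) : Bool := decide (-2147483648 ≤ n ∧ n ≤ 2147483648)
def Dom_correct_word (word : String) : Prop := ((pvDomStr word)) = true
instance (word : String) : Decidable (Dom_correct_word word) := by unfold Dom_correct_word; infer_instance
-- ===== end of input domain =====

-- B replaces A's stateful-flag loop by find-the-first-non-punctuation index, keep that
-- prefix verbatim, and mask only the tail; same output, same cost (objective: alternative).

-- string.punctuation, shared "letter in punctuation" test (exact for single chars)
def pvPunct : List Char := "!\"#$%&'()*+,-./:;<=>?@[\\]^_`{|}~".toList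
def pvIsPunct (c : Char) : Bool := pvPunct.contains c

-- ===== PORT A =====
-- one step of A's for-loop over (new_w, first)
def pvStepA (st : List Char × Bool) (letter : Char) : List Char × Bool :=
  if pvIsPunct letter then (st.1 ++ [letter], st.2)
  else if st.2 then (st.1 ++ [letter], false)
  else (st.1 ++ ['*'], st.2)

def correct_word (word : String) : String :=
  String.ofList (word.toList.foldl pvStepA ([], true)).1

-- ===== PORT B =====
-- ''.join(c if c in punctuation else '*' for c in tail)
def pvMaskTail (l : List Char) : List Char :=
  l.map (fun c => if pvIsPunct c then c else '*')

def correct_word_alt (word : String) : String :=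
  match word.toList.findIdx? (fun c => !(pvIsPunct c)) with
  | none => word
  | some i => String.ofList (word.toList.take (i + 1) ++ pvMaskTail (word.toList.drop (i + 1)))

-- ===== PRECONDITION & SPEC =====
def Spec_correct_word (word : String) (out : String) : Prop := out = correct_word_alt word
instance (word : String) (out : String) : Decidable (Spec_correct_word word out) := by unfold Spec_correct_word; infer_instance

-- ===== CLAIM (what is proved, stated in full; the proofs are below) =====
def Claim_equal_correct_word : Prop := ∀ (word : String), Dom_correct_word word → Spec_correct_word word (correct_word word)

-- ===== LEMMAS AND PROOFS =====

-- B's result as a function of the character list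
def pvAltList (l : List Char) : List Char :=
  match l.findIdx? (fun c => !(pvIsPunct c)) with
  | none => l
  | some i => l.take (i + 1) ++ pvMaskTail (l.drop (i + 1))

theorem pvFoldFalse (l : List Char) (acc : List Char) :
    l.foldl pvStepA (acc, false) = (acc ++ pvMaskTail l, false) := by
  induction l generalizing acc with
  | nil => simp [pvMaskTail]
  | cons c t ih =>
      by_cases h : pvIsPunct c = true <;>
        simp [pvStepA, pvMaskTail, h, ih, List.foldl_cons]

theorem pvFoldTrue (l : List Char) (acc : List Char) :
    (l.foldl pvStepA (acc, true)).1 = acc ++ pvAltList l := by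
  induction l generalizing acc with
  | nil => simp [pvAltList]
  | cons c t ih =>
      by_cases h : pvIsPunct c = true
      · simp only [List.foldl_cons, pvStepA, h, if_pos]
        rw [ih]
        have : pvAltList (c :: t) = c :: pvAltList t := by
          unfold pvAltList
          simp only [List.findIdx?_cons, h, Bool.not_true, if_neg, Bool.false_eq_true,
            not_false_iff]
          cases hfi : t.findIdx? (fun c => !(pvIsPunct c)) with
          | none => simp
          | some i => simp [List.take_succ_cons, List.drop_succ_cons]
        simp [this]
      · simp only [List.foldl_cons, pvStepA, h, if_neg, if_pos, Bool.false_eq_true,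
          not_false_iff]
        rw [pvFoldFalse]
        have : pvAltList (c :: t) = c :: pvMaskTail t := by
          unfold pvAltList
          simp [List.findIdx?_cons, h]
        simp [this]

theorem pvAlt_eq (word : String) : correct_word_alt word = String.ofList (pvAltList word.toList) := by
  unfold correct_word_alt pvAltList
  cases h : word.toList.findIdx? (fun c => !(pvIsPunct c)) with
  | none => simp
  | some i => simp

-- ===== VERDICT (by name: the statement is the Claim_ definition above) =====
theorem correct_word_spec : Claim_equal_correct_word := by
  intro word _
  unfold Spec_correct_word correct_word
  rw [pvAlt_eq, pvFoldTrue]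
  simp
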